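-- pv_equiv track=rewrite | github.com/Irors/Gate.io_add_wl | Gate_io_add_to_wl.py | generate
-- ===== SOURCE A (Python) =====
-- def generate(mass):
--         s = ''
--         count = 1
--         for i in range(len(mass)):
--             s = s + "".join(f"{mass[i]}@")
--         s = s[:-1]
--
--         for ind, sumb in enumerate(s):
--             if sumb == "@":
--
--                 if count % 10 == 0:
--                     s = s[:ind] + " " + s[ind + 1:]
--                     count += 1
--                 else:
--                     count += 1
--
--         massive = s.split()
--
--         return massive
-- ===== SOURCE B (Python) =====
-- def generate(mass):
--     massive = []
--     for i in range(0, len(mass), 10):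
--         massive.append("@".join(str(x) for x in mass[i:i+10]))
--     return massive
-- ===== Notes on version B (the rewrite author's own statement) =====
-- stated objective: faster
-- what changed: B walks the list in strides of 10 (one pass, slicing each chunk and joining it with '@') instead of A's building one big '@'-joined string, splicing every 10th '@' into a space by quadratic string slicing, and re-splitting on whitespace.
import Mathlib
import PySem

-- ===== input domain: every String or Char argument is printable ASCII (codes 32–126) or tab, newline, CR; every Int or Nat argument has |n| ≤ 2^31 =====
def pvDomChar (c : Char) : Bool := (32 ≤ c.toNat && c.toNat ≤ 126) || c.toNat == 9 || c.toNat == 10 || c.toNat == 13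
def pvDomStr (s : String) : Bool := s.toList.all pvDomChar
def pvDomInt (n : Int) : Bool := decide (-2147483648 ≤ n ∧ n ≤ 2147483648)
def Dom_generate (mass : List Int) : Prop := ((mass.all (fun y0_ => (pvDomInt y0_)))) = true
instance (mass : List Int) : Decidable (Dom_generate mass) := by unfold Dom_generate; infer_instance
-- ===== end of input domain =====

-- B replaces A's quadratic in-place character splicing (join everything with '@',
-- overwrite every 10th '@' with a space, re-split) by a single linear pass that
-- chunks the list ten elements at a time and joins each chunk with '@'.

-- ===== PORT A =====
def generate (mass : List Int) : List String :=
  -- s = ''; for i in range(len(mass)): s = s + "".join(f"{mass[i]}@")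
  let s0 : List Char := (PySem.List.pyRange 0 (PySem.List.len mass)).foldl
      (fun s i => s ++ (PySem.Int.toChars (PySem.List.pyGetD mass i 0) ++ ['@'])) []
  -- s = s[:-1]
  let s1 : List Char := PySem.List.slice s0 none (some (-1))
  -- for ind, sumb in enumerate(s): …   (state: the evolving s and count)
  let st := (PySem.List.enumerate s1).foldl
      (fun (st : List Char × Int) p =>
        if p.2 = '@' then
          if PySem.Int.mod st.2 10 = 0 then
            (PySem.List.slice st.1 none (some p.1) ++ [' ']
              ++ PySem.List.slice st.1 (some (p.1 + 1)) none, st.2 + 1)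
          else (st.1, st.2 + 1)
        else st) (s1, 1)
  -- massive = s.split()
  (PySem.Chars.split₀ st.1).map String.ofList

-- ===== PORT B =====
-- massive = []; for i in range(0, len(mass), 10): massive.append("@".join(str(x) for x in mass[i:i+10]))
def generate_alt (mass : List Int) : List String :=
  ((PySem.List.pyRange 0 (PySem.List.len mass) 10).foldl
    (fun massive i => massive ++ [PySem.Chars.join ['@']
      ((PySem.List.slice mass (some i) (some (i + 10))).map PySem.Int.toChars)]) []).map
    String.ofList

-- ===== PRECONDITION & SPEC =====
def Spec_generate (mass : List Int) (out : List String) : Prop := out = generate_alt mass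
instance (mass : List Int) (out : List String) : Decidable (Spec_generate mass out) := by unfold Spec_generate; infer_instance

-- ===== CLAIM (what is proved, stated in full; the proofs are below) =====
def Claim_equal_generate : Prop := ∀ (mass : List Int), Dom_generate mass → Spec_generate mass (generate mass)

-- ===== LEMMAS AND PROOFS =====

-- B's loop, as a recursion that chunks ten elements at a time (proof helper)
def altGo : List Int → List (List Char)
  | [] => []
  | x :: xs =>
      PySem.Chars.join ['@'] ((List.take 10 (x :: xs)).map PySem.Int.toChars)
        :: altGo (List.drop 10 (x :: xs))
termination_by l => l.length
decreasing_by simp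

theorem pyRange_step_cons (a b : Int) (h : a < b) :
    PySem.List.pyRange a b 10 = a :: PySem.List.pyRange (a + 10) b 10 := by
  rw [PySem.List.pyRange_of_pos a b (by norm_num), PySem.List.pyRange_of_pos (a+10) b (by norm_num)]
  rw [if_pos h]
  by_cases h2 : a + 10 < b
  · rw [if_pos h2]
    have hn : ((b - a + 10 - 1) / 10).toNat = ((b - (a + 10) + 10 - 1) / 10).toNat + 1 := by omega
    rw [hn, List.range_succ_eq_map]
    simp [List.map_map, Function.comp]
    intro k _
    ring
  · rw [if_neg h2]
    have hn : ((b - a + 10 - 1) / 10).toNat = 1 := by omega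
    rw [hn]
    simp [List.range_succ]
theorem pyRange_step_nil (a b : Int) (h : ¬ a < b) :
    PySem.List.pyRange a b 10 = [] := by
  rw [PySem.List.pyRange_of_pos a b (by norm_num), if_neg h]
  simp

theorem pyfold (l : List Int) : ∀ (fuel k : Nat) (acc : List (List Char)),
    l.length ≤ k + 10 * fuel →
    (PySem.List.pyRange (k : Int) (PySem.List.len l) 10).foldl
      (fun massive i => massive ++ [PySem.Chars.join ['@']
        ((PySem.List.slice l (some i) (some (i + 10))).map PySem.Int.toChars)]) acc
    = acc ++ altGo (l.drop k) := by
  intro fuel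
  induction fuel with
  | zero =>
    intro k acc h
    have hk : l.length ≤ k := by omega
    rw [pyRange_step_nil _ _ (by simp [PySem.List.len]; omega)]
    rw [List.drop_eq_nil_of_le hk]
    simp [altGo]
  | succ fuel ih =>
    intro k acc h
    by_cases hk : k < l.length
    · rw [pyRange_step_cons _ _ (by simp [PySem.List.len]; omega)]
      rw [List.foldl_cons]
      have hs : PySem.List.slice l (some (k : Int)) (some ((k : Int) + 10))
          = List.take 10 (List.drop k l) := by
        rw [show ((k : Int) + 10) = ((k : Int) + ((10 : Nat) : Int)) from by push_cast; ring]
        exact PySem.List.slice_natCast_add l k 10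
      rw [hs]
      rw [show ((k : Int) + 10) = (((k + 10 : Nat)) : Int) from by push_cast; ring]
      rw [ih (k + 10) _ (by omega)]
      cases hd : l.drop k with
      | nil => exact absurd (List.drop_eq_nil_iff.mp hd) (by omega)
      | cons x xs =>
        rw [altGo]
        rw [show List.drop (k + 10) l = List.drop 10 (List.drop k l) from by
          rw [List.drop_drop]]
        rw [hd]
        simp
    · rw [pyRange_step_nil _ _ (by simp [PySem.List.len]; omega)]
      rw [List.drop_eq_nil_of_le (by omega)]
      simp [altGo]

-- the marking pass of A, as a left-to-right scan: every '@' whose 1-based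
-- occurrence number (counted by c) is divisible by 10 becomes a space
def mark : List Char → Int → List Char
  | [], _ => []
  | ch :: t, c =>
      if ch = '@' then (if PySem.Int.mod c 10 = 0 then ' ' else '@') :: mark t (c + 1)
      else ch :: mark t c

-- words joined by the marked separators (separator number c, c+1, …)
def joinSeps : List (List Char) → Int → List Char
  | [], _ => []
  | [w], _ => w
  | w :: w' :: ws, c =>
      w ++ (if PySem.Int.mod c 10 = 0 then ' ' else '@') :: joinSeps (w' :: ws) (c + 1)

-- the same string, regrouped: words merged with '@' until a separator ≡ 0 (mod 10)
def grouped : List (List Char) → Int → List (List Char)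
  | [], _ => []
  | [w], _ => [w]
  | w :: w' :: ws, c =>
      match grouped (w' :: ws) (c + 1) with
      | [] => [w]
      | g :: gs => if PySem.Int.mod c 10 = 0 then w :: g :: gs else (w ++ '@' :: g) :: gs

-- altGo with the size of the first chunk generalized
def altGoN : Nat → List Int → List (List Char)
  | 0, _ => []
  | _, [] => []
  | n + 1, x :: xs =>
      PySem.Chars.join ['@'] ((List.take (n + 1) (x :: xs)).map PySem.Int.toChars)
        :: altGoN 10 (List.drop n xs)
termination_by _ l => l.length
decreasing_by simp

theorem toChars_ne_nil (n : Int) : PySem.Int.toChars n ≠ [] := by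
  unfold PySem.Int.toChars
  split
  · simp
  · have := @Nat.length_toDigits_pos 10 n.toNat
    intro h; rw [h] at this; simp at this

theorem toChars_chars {n : Int} {c : Char} (h : c ∈ PySem.Int.toChars n) :
    PySem.Chars.isspace c = false ∧ c ≠ '@' := by
  have hdig : ∀ ch : Char, ch.isDigit = true → PySem.Chars.isspace ch = false ∧ ch ≠ '@' := by
    intro ch hch
    simp [Char.isDigit, UInt32.le_iff_toNat_le] at hch
    constructor
    · unfold PySem.Chars.isspace
      simp only [Bool.or_eq_false_iff, Bool.and_eq_false_iff, decide_eq_false_iff_not]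
      have heq : ch.toNat = ch.val.toNat := rfl
      omega
    · intro he; subst he; simp at hch
  unfold PySem.Int.toChars at h
  split at h
  · rcases List.mem_cons.mp h with h | h
    · subst h; exact ⟨by decide, by decide⟩
    · exact hdig c (Nat.isDigit_of_mem_toDigits (by norm_num) (le_refl 10) h)
  · exact hdig c (Nat.isDigit_of_mem_toDigits (by norm_num) (le_refl 10) h)

theorem loop_eq (t : List Char) : ∀ (pre : List Char) (c : Int),
    (PySem.List.enumerate t (pre.length : Int)).foldl
      (fun (st : List Char × Int) p =>
        if p.2 = '@' then
          if PySem.Int.mod st.2 10 = 0 then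
            (PySem.List.slice st.1 none (some p.1) ++ [' ']
              ++ PySem.List.slice st.1 (some (p.1 + 1)) none, st.2 + 1)
          else (st.1, st.2 + 1)
        else st) (pre ++ t, c)
      = (pre ++ mark t c, c + (t.countP (· == '@') : Int)) := by
  induction t with
  | nil => intro pre c; simp [PySem.List.enumerate_nil, mark]
  | cons ch t ih =>
    intro pre c
    rw [PySem.List.enumerate_cons]
    simp only [List.foldl_cons]
    by_cases hch : ch = '@'
    · subst hch
      by_cases hc : PySem.Int.mod c 10 = 0
      · have h1 : PySem.List.slice (pre ++ '@' :: t) none (some (pre.length : Int)) = pre := by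
          rw [PySem.List.slice_to_natCast]; exact List.take_left
        have h2 : PySem.List.slice (pre ++ '@' :: t) (some ((pre.length : Int) + 1)) none = t := by
          have he : ((pre.length : Int) + 1) = ((pre.length + 1 : Nat) : Int) := by push_cast; ring
          rw [he, PySem.List.slice_from_natCast]
          simp [List.drop_append]
        simp only [reduceIte, hc, h1, h2]
        have h3 : pre ++ [' '] ++ t = (pre ++ [' ']) ++ t := by simp
        have h4 : (pre.length : Int) + 1 = (((pre ++ [' ']).length : Nat) : Int) := by
          simp
        rw [h3, h4, ih (pre ++ [' ']) (c + 1)]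
        simp only [mark, reduceIte, hc, List.countP_cons]
        rw [Prod.mk.injEq]
        refine ⟨by simp, by simp; ring⟩
      · simp only [reduceIte, if_neg hc]
        have h3 : pre ++ '@' :: t = (pre ++ ['@']) ++ t := by simp
        have h4 : (pre.length : Int) + 1 = (((pre ++ ['@']).length : Nat) : Int) := by
          simp
        rw [h3, h4, ih (pre ++ ['@']) (c + 1)]
        simp only [mark, reduceIte, if_neg hc, List.countP_cons]
        rw [Prod.mk.injEq]
        refine ⟨by simp, by simp; ring⟩
    · rw [if_neg (by simpa using hch)]
      have h3 : pre ++ ch :: t = (pre ++ [ch]) ++ t := by simp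
      have h4 : (pre.length : Int) + 1 = (((pre ++ [ch]).length : Nat) : Int) := by
        simp
      rw [h3, h4, ih (pre ++ [ch]) c]
      simp only [mark, if_neg hch, List.countP_cons]
      rw [Prod.mk.injEq]
      refine ⟨by simp, by simp [hch]⟩

theorem mark_append_no_at (w : List Char) : ∀ (t : List Char) (c : Int),
    (∀ ch ∈ w, ch ≠ '@') → mark (w ++ t) c = w ++ mark t c := by
  induction w with
  | nil => intro t c _; simp
  | cons ch w ih =>
    intro t c h
    have hch : ch ≠ '@' := h ch (List.mem_cons_self)
    simp only [List.cons_append, mark, if_neg hch]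
    rw [ih t c (fun x hx => h x (List.mem_cons_of_mem _ hx))]

theorem markJoin : ∀ (ws : List (List Char)) (c : Int),
    (∀ w ∈ ws, ∀ ch ∈ w, ch ≠ '@') →
    mark (PySem.Chars.join ['@'] ws) c = joinSeps ws c
  | [], c, _ => by simp [PySem.Chars.join_nil, mark, joinSeps]
  | [w], c, h => by
    rw [PySem.Chars.join_singleton, joinSeps]
    have := mark_append_no_at w [] c (h w (by simp))
    simpa [mark] using this
  | w :: w' :: ws, c, h => by
    rw [PySem.Chars.join_cons_cons, joinSeps, List.append_assoc,
      mark_append_no_at w _ c (h w (by simp))]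
    congr 1
    show mark ('@' :: PySem.Chars.join ['@'] (w' :: ws)) c = _
    rw [mark, if_pos rfl, markJoin (w' :: ws) (c + 1) (fun x hx => h x (by simp [hx]))]

theorem grouped_ne_nil : ∀ (ws : List (List Char)) (c : Int), ws ≠ [] → grouped ws c ≠ []
  | [], _, h => absurd rfl h
  | [w], c, _ => by simp [grouped]
  | w :: w' :: ws, c, _ => by
    rw [grouped]
    cases grouped (w' :: ws) (c + 1) with
    | nil => simp
    | cons g gs =>
      change (if PySem.Int.mod c 10 = 0 then w :: g :: gs else (w ++ '@' :: g) :: gs) ≠ []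
      by_cases h : PySem.Int.mod c 10 = 0
      · rw [if_pos h]; simp
      · rw [if_neg h]; simp

theorem joinSeps_eq : ∀ (ws : List (List Char)) (c : Int),
    joinSeps ws c = PySem.Chars.join [' '] (grouped ws c)
  | [], c => by simp [joinSeps, grouped, PySem.Chars.join_nil]
  | [w], c => by simp [joinSeps, grouped, PySem.Chars.join_singleton]
  | w :: w' :: ws, c => by
    rw [joinSeps, grouped, joinSeps_eq (w' :: ws) (c + 1)]
    have hne := grouped_ne_nil (w' :: ws) (c + 1) (by simp)
    cases hg : grouped (w' :: ws) (c + 1) with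
    | nil => exact absurd hg hne
    | cons g gs =>
      by_cases hc : PySem.Int.mod c 10 = 0
      · simp only [if_pos hc, PySem.Chars.join_cons_cons]
        simp
      · simp only [if_neg hc]
        cases gs with
        | nil => simp [PySem.Chars.join_singleton]
        | cons g' gs' => simp [PySem.Chars.join_cons_cons]

theorem grouped_words : ∀ (ws : List (List Char)) (c : Int),
    (∀ w ∈ ws, w ≠ [] ∧ ∀ ch ∈ w, PySem.Chars.isspace ch = false) →
    ∀ g ∈ grouped ws c, g ≠ [] ∧ ∀ ch ∈ g, PySem.Chars.isspace ch = false
  | [], c, _ => by simp [grouped]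
  | [w], c, h => by simpa [grouped] using h w (by simp)
  | w :: w' :: ws, c, h => by
    rw [grouped]
    have ih := grouped_words (w' :: ws) (c + 1) (fun x hx => h x (by simp [hx]))
    cases hg : grouped (w' :: ws) (c + 1) with
    | nil => simpa using h w (by simp)
    | cons g gs =>
      rw [hg] at ih
      have hw := h w (by simp)
      have hgh := ih g (by simp)
      by_cases hc : PySem.Int.mod c 10 = 0
      · simp only [if_pos hc]
        intro x hx
        rcases List.mem_cons.mp hx with rfl | hx
        · exact hw
        · exact ih x hx
      · simp only [if_neg hc]
        intro x hx
        rcases List.mem_cons.mp hx with rfl | hx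
        · refine ⟨by simp, ?_⟩
          intro ch hch
          rcases List.mem_append.mp hch with hch | hch
          · exact hw.2 ch hch
          · rcases List.mem_cons.mp hch with rfl | hch
            · decide
            · exact hgh.2 ch hch
        · exact ih x (by simp [hx])

theorem go_word (w : List Char) : ∀ (t cur : List Char) (acc : List (List Char)),
    (∀ ch ∈ w, PySem.Chars.isspace ch = false) →
    PySem.Chars.split₀.go (w ++ t) cur acc = PySem.Chars.split₀.go t (w.reverse ++ cur) acc := by
  induction w with
  | nil => intro t cur acc _; simp
  | cons ch w ih =>
    intro t cur acc h
    have hch : PySem.Chars.isspace ch = false := h ch (List.mem_cons_self)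
    simp only [List.cons_append, PySem.Chars.split₀.go, hch, Bool.false_eq_true, if_false]
    rw [ih t (ch :: cur) acc (fun x hx => h x (List.mem_cons_of_mem _ hx))]
    simp

theorem go_join : ∀ (ps : List (List Char)) (acc : List (List Char)),
    (∀ p ∈ ps, p ≠ [] ∧ ∀ ch ∈ p, PySem.Chars.isspace ch = false) →
    PySem.Chars.split₀.go (PySem.Chars.join [' '] ps) [] acc = acc.reverse ++ ps
  | [], acc, _ => by simp [PySem.Chars.join_nil, PySem.Chars.split₀.go]
  | [p], acc, h => by
    have hp := h p (by simp)
    have hgw := go_word p [] [] acc hp.2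
    simp only [List.append_nil] at hgw
    rw [PySem.Chars.join_singleton, hgw]
    simp [PySem.Chars.split₀.go, List.isEmpty_iff, hp.1]
  | p :: q :: ps, acc, h => by
    rw [PySem.Chars.join_cons_cons, List.append_assoc]
    have hp := h p (by simp)
    rw [go_word p _ [] acc hp.2]
    show PySem.Chars.split₀.go (' ' :: PySem.Chars.join [' '] (q :: ps)) _ _ = _
    rw [PySem.Chars.split₀.go]
    simp only [show PySem.Chars.isspace ' ' = true from rfl, if_pos]
    simp only [List.append_nil, List.isEmpty_iff, List.reverse_eq_nil_iff, hp.1, if_false]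
    rw [go_join (q :: ps) (p.reverse.reverse :: acc) (fun x hx => h x (by simp [hx]))]
    simp

theorem split_join (ps : List (List Char))
    (h : ∀ p ∈ ps, p ≠ [] ∧ ∀ ch ∈ p, PySem.Chars.isspace ch = false) :
    PySem.Chars.split₀ (PySem.Chars.join [' '] ps) = ps := by
  unfold PySem.Chars.split₀
  simpa using go_join ps [] h

theorem altGo_eq_altGoN : ∀ (fuel : Nat) (l : List Int), l.length ≤ fuel → altGo l = altGoN 10 l
  | _, [], _ => by simp [altGo, altGoN]
  | 0, x :: xs, h => by simp at h
  | fuel + 1, x :: xs, h => by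
    rw [altGo, altGoN]
    congr 1
    have : List.drop 10 (x :: xs) = List.drop 9 xs := rfl
    rw [this]
    exact altGo_eq_altGoN fuel (List.drop 9 xs) (by simp at h ⊢; omega)

theorem grouped_chunks : ∀ (l : List Int) (n : Nat) (c : Int), 1 ≤ n → n ≤ 10 →
    PySem.Int.mod c 10 = ((11 - n) % 10 : Nat) →
    grouped (l.map PySem.Int.toChars) c = altGoN n l
  | [], n, c, h1, _, _ => by cases n <;> simp [grouped, altGoN]
  | [x], n, c, h1, _, _ => by
    obtain ⟨m, rfl⟩ : ∃ m, n = m + 1 := ⟨n - 1, by omega⟩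
    simp [grouped, altGoN, PySem.Chars.join_singleton]
  | x :: y :: xs, n, c, h1, h2, hc => by
    have hmod := PySem.Int.mod_eq_emod_of_pos (a := c) (b := 10) (by norm_num)
    have hmod1 := PySem.Int.mod_eq_emod_of_pos (a := c + 1) (b := 10) (by norm_num)
    simp only [List.map_cons]
    rw [grouped]
    by_cases hn : n = 1
    · subst hn
      have hc0 : PySem.Int.mod c 10 = 0 := by simpa using hc
      have hc1 : PySem.Int.mod (c + 1) 10 = ((11 - 10) % 10 : Nat) := by
        rw [hmod1]; rw [hmod] at hc0; push_cast; omega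
      have ih : grouped ((y :: xs).map PySem.Int.toChars) (c + 1) = altGoN 10 (y :: xs) :=
        grouped_chunks (y :: xs) 10 (c + 1) (by norm_num) (by norm_num) hc1
      simp only [List.map_cons] at ih
      rw [ih]
      cases hg : altGoN 10 (y :: xs) with
      | nil => rw [altGoN] at hg; simp at hg
      | cons g gs =>
        simp only [if_pos hc0]
        rw [show altGoN 1 (x :: y :: xs)
            = PySem.Chars.join ['@'] ((List.take 1 (x :: y :: xs)).map PySem.Int.toChars)
              :: altGoN 10 (List.drop 0 (y :: xs)) from by rw [altGoN]]
        rw [← hg]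
        simp [PySem.Chars.join_singleton]
    · obtain ⟨m, rfl⟩ : ∃ m, n = m + 2 := ⟨n - 2, by omega⟩
      have hm8 : m ≤ 8 := by omega
      have hcv : PySem.Int.mod c 10 = ((9 - m : Nat) : Int) := by
        rw [hc]; congr 1; omega
      have hcne : ¬ PySem.Int.mod c 10 = 0 := by
        rw [hmod] at hcv ⊢; omega
      have hc1 : PySem.Int.mod (c + 1) 10 = ((11 - (m + 1)) % 10 : Nat) := by
        rw [hmod1]; rw [hmod] at hcv; omega
      have ih : grouped ((y :: xs).map PySem.Int.toChars) (c + 1) = altGoN (m + 1) (y :: xs) :=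
        grouped_chunks (y :: xs) (m + 1) (c + 1) (by omega) (by omega) hc1
      simp only [List.map_cons] at ih
      rw [ih]
      cases hg : altGoN (m + 1) (y :: xs) with
      | nil => rw [altGoN] at hg; simp at hg
      | cons g gs =>
        rw [altGoN] at hg
        injection hg with hg1 hg2
        simp only [if_neg hcne]
        rw [show altGoN (m + 2) (x :: y :: xs)
            = PySem.Chars.join ['@'] ((List.take (m + 2) (x :: y :: xs)).map PySem.Int.toChars)
              :: altGoN 10 (List.drop (m + 1) (y :: xs)) from by rw [altGoN]]
        congr 1
        · rw [← hg1]
          rw [show List.take (m + 2) (x :: y :: xs) = x :: List.take (m + 1) (y :: xs) from rfl,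
            List.map_cons]
          rw [show (List.take (m + 1) (y :: xs)).map PySem.Int.toChars
              = PySem.Int.toChars y :: (List.take m xs).map PySem.Int.toChars from by
            rw [show List.take (m + 1) (y :: xs) = y :: List.take m xs from rfl, List.map_cons]]
          rw [PySem.Chars.join_cons_cons]
          simp
        · rw [← hg2]
          rfl

-- final assembly
theorem dropLast_flat : ∀ (ws : List (List Char)),
    (ws.flatMap (fun w => w ++ ['@'])).dropLast = PySem.Chars.join ['@'] ws
  | [] => by simp [PySem.Chars.join_nil]
  | [w] => by simp [PySem.Chars.join_singleton]
  | w :: w' :: ws => by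
    rw [List.flatMap_cons, PySem.Chars.join_cons_cons]
    have hne : (w' :: ws).flatMap (fun w => w ++ ['@']) ≠ [] := by simp
    rw [List.dropLast_append_of_ne_nil hne, dropLast_flat (w' :: ws)]

theorem generate_eq (mass : List Int) : generate mass = generate_alt mass := by
  have hnoat : ∀ w ∈ mass.map PySem.Int.toChars, ∀ ch ∈ w, ch ≠ '@' := by
    intro w hw ch hch
    obtain ⟨x, _, rfl⟩ := List.mem_map.mp hw
    exact (toChars_chars hch).2
  have hwords : ∀ w ∈ mass.map PySem.Int.toChars,
      w ≠ [] ∧ ∀ ch ∈ w, PySem.Chars.isspace ch = false := by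
    intro w hw
    obtain ⟨x, _, rfl⟩ := List.mem_map.mp hw
    exact ⟨toChars_ne_nil x, fun ch hch => (toChars_chars hch).1⟩
  unfold generate generate_alt
  simp only []
  have hB := pyfold mass mass.length 0 [] (by omega)
  simp only [Nat.cast_zero, List.nil_append, List.drop_zero] at hB
  rw [hB]
  rw [PySem.List.foldl_pyRange_pyGetD mass 0
    (fun s x => s ++ (PySem.Int.toChars x ++ ['@'])) [] (le_refl 0)]
  rw [Int.toNat_zero, List.drop_zero]
  rw [PySem.List.foldl_append_eq_flatMap (fun x => PySem.Int.toChars x ++ ['@']) mass []]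
  rw [List.nil_append, PySem.List.slice_to_neg_one]
  rw [show List.flatMap (fun x => PySem.Int.toChars x ++ ['@']) mass
      = (mass.map PySem.Int.toChars).flatMap (fun w => w ++ ['@']) from
    (List.flatMap_map PySem.Int.toChars (fun w => w ++ ['@']) mass).symm]
  rw [dropLast_flat]
  have hl := loop_eq (PySem.Chars.join ['@'] (mass.map PySem.Int.toChars)) [] 1
  simp only [List.nil_append, List.length_nil, Nat.cast_zero] at hl
  rw [hl]
  simp only []
  rw [markJoin _ 1 hnoat, joinSeps_eq, split_join _ (grouped_words _ 1 hwords)]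
  rw [grouped_chunks mass 10 1 (by norm_num) (by norm_num) (by decide)]
  rw [altGo_eq_altGoN mass.length mass (le_refl _)]
-- ===== VERDICT (by name: the statement is the Claim_ definition above) =====
theorem generate_spec : Claim_equal_generate := by
  intro mass _
  unfold Spec_generate
  exact generate_eq mass
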